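-- pv_equiv track=rewrite | github.com/PrebenTjemsland/Advent-of-code | AdventOfCode2025/day02/Task2.py | is_repeating_pattern
-- ===== SOURCE A (Python) =====
-- def is_repeating_pattern(currentId):
--     s = str(currentId)
--     length = len(s)
--
--     # We only need to check patterns up to half the length of the string.
--     # (A pattern longer than half cannot repeat to fill the whole string).
--     for i in range(1, (length // 2) + 1):
--
--         # Optimization: A pattern can only fit perfectly if the total length
--         # is divisible by the pattern length.
--         if length % i == 0:
--             pattern = s[:i]  # Take the first i characters
--
--             # Logic: If we replace the pattern with nothing, is the result empty?
--             if s.replace(pattern, "") == "":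
--                 return True
--
--             # Alternative (slightly faster) logic:
--             # repeats_needed = length // i
--             # if pattern * repeats_needed == s:
--             #     return True
--
--     return False
-- ===== SOURCE B (Python) =====
-- def is_repeating_pattern(currentId):
--     s = str(currentId)
--     return s in (s + s)[1:-1]
-- ===== Notes on version B (the rewrite author's own statement) =====
-- stated objective: idiomatic
-- what changed: Replaces the divisor loop with per-divisor replace-and-compare checks by the classic string-periodicity trick: s is a repetition of a proper block iff s occurs in (s+s)[1:-1], a single substring search.
import Mathlib
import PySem

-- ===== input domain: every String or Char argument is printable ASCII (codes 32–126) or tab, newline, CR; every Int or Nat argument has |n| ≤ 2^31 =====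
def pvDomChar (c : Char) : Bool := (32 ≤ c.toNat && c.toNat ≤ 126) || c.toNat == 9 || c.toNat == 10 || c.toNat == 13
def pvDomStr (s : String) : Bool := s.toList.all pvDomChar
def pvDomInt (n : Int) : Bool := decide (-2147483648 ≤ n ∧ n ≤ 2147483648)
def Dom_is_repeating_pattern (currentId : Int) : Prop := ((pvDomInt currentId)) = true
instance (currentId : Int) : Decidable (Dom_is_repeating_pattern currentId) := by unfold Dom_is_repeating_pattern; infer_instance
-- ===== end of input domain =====

-- B replaces A's divisor loop (with a replace-and-compare test per divisor) by the classic
-- string-periodicity trick: s is a repetition of a proper block iff s occurs in (s+s)[1:-1].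


-- ===== PORT A =====
def is_repeating_pattern (currentId : Int) : Bool :=
  let s := PySem.Int.toChars currentId
  let length := PySem.Chars.len s
  (PySem.List.pyRange 1 (PySem.Int.floordiv length 2 + 1)).any fun i =>
    if PySem.Int.mod length i == 0 then
      -- pattern = s[:i];  s.replace(pattern, "") == ""
      PySem.Chars.replace s (PySem.Chars.slice s none (some i)) [] == []
    else false

-- ===== PORT B =====
def is_repeating_pattern_alt (currentId : Int) : Bool :=
  let s := PySem.Int.toChars currentId
  PySem.Chars.isIn s (PySem.Chars.slice (s ++ s) (some 1) (some (-1)))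

-- ===== PRECONDITION & SPEC =====
def Spec_is_repeating_pattern (currentId : Int) (out : Bool) : Prop := out = is_repeating_pattern_alt currentId
instance (currentId : Int) (out : Bool) : Decidable (Spec_is_repeating_pattern currentId out) := by unfold Spec_is_repeating_pattern; infer_instance

-- ===== CLAIM (what is proved, stated in full; the proofs are below) =====
def Claim_equal_is_repeating_pattern : Prop := ∀ (currentId : Int), Dom_is_repeating_pattern currentId → Spec_is_repeating_pattern currentId (is_repeating_pattern currentId)

-- ===== LEMMAS AND PROOFS =====
def repB (p : List Char) (k : ℕ) : List Char := (List.replicate k p).flatten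
theorem repB_succ (p : List Char) (k : ℕ) : repB p (k+1) = p ++ repB p k := by
  simp [repB, List.replicate_succ]
theorem repB_len (p : List Char) (k : ℕ) : (repB p k).length = k * p.length := by
  simp [repB, List.length_flatten]

theorem go_rep (p : List Char) (hp : p ≠ []) :
    ∀ fuel k (acc : List Char), (repB p k).length ≤ fuel →
      PySem.Chars.replace.go p [] fuel (repB p k) acc = acc.reverse := by
  intro fuel
  induction fuel with
  | zero =>
    intro k acc hle
    have : repB p k = [] := List.eq_nil_of_length_eq_zero (by omega)
    rw [this, PySem.Chars.replace.go.eq_def]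
    simp
  | succ f ih =>
    intro k acc hle
    cases k with
    | zero => rw [repB, PySem.Chars.replace.go.eq_def]; simp
    | succ k' =>
      rw [repB_succ] at hle ⊢
      obtain ⟨c, p', rfl⟩ : ∃ c p', p = c :: p' := by
        cases p with | nil => exact absurd rfl hp | cons c p' => exact ⟨c, p', rfl⟩
      rw [PySem.Chars.replace.go.eq_def]
      simp only [List.cons_append]
      rw [if_pos]
      · have hdrop : List.drop (c :: p').length (c :: (p' ++ repB (c :: p') k')) = repB (c :: p') k' := by
          rw [← List.cons_append, List.drop_left]
        rw [hdrop]
        simp only [List.reverse_nil, List.nil_append]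
        apply ih
        simp [repB_len] at hle ⊢
        omega
      · rw [List.isPrefixOf_iff_prefix, ← List.cons_append]
        exact List.prefix_append _ _

theorem go_empty (p : List Char) (hp : p ≠ []) :
    ∀ fuel (l acc : List Char), l.length ≤ fuel →
      PySem.Chars.replace.go p [] fuel l acc = [] → acc = [] ∧ ∃ k, l = repB p k := by
  intro fuel
  induction fuel with
  | zero =>
    intro l acc hle h
    have hl : l = [] := List.eq_nil_of_length_eq_zero (by omega)
    rw [hl, PySem.Chars.replace.go.eq_def] at h
    simp at h
    exact ⟨h, 0, by simp [hl, repB]⟩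
  | succ f ih =>
    intro l acc hle h
    cases l with
    | nil =>
      rw [PySem.Chars.replace.go.eq_def] at h
      simp at h
      exact ⟨h, 0, rfl⟩
    | cons c t =>
      rw [PySem.Chars.replace.go.eq_def] at h
      simp only [] at h
      by_cases hpre : p.isPrefixOf (c :: t) = true
      · rw [if_pos hpre] at h
        simp only [List.reverse_nil, List.nil_append] at h
        have hplen : 1 ≤ p.length := by
          cases p with | nil => exact absurd rfl hp | cons _ _ => simp
        have hdl : (List.drop p.length (c :: t)).length ≤ f := by
          simp [List.length_drop] at *
          omega
        obtain ⟨hacc, k, hk⟩ := ih _ _ hdl h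
        refine ⟨hacc, k + 1, ?_⟩
        rw [repB_succ, ← hk]
        have := List.isPrefixOf_iff_prefix.mp hpre
        obtain ⟨r, hr⟩ := this
        rw [← hr, List.drop_left]
      · rw [if_neg hpre] at h
        obtain ⟨hacc, _⟩ := ih _ _ (by simp at hle ⊢; omega) h
        exact absurd hacc (by simp)

theorem repB_add (p : List Char) (a b : ℕ) : repB p (a+b) = repB p a ++ repB p b := by
  rw [repB, List.replicate_add, List.flatten_append]; rfl

theorem replace_empty_iff (t p : List Char) (hp : p ≠ []) :
    PySem.Chars.replace t p [] = [] ↔ ∃ k, t = repB p k := by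
  unfold PySem.Chars.replace
  rw [if_neg (by simpa [List.isEmpty_iff] using hp)]
  constructor
  · intro h; exact (go_empty p hp t.length t [] le_rfl h).2
  · rintro ⟨k, rfl⟩
    rw [go_rep p hp _ k [] le_rfl]; rfl

theorem P1_to_P2 (t : List Char) (j : ℕ) (hj1 : 1 ≤ j) (hj2 : j ≤ t.length / 2)
    (_hdvd : j ∣ t.length) (k : ℕ) (hk : t = repB (t.take j) k) :
    ∃ a b : List Char, a ≠ [] ∧ b ≠ [] ∧ a ++ t ++ b = t ++ t := by
  set p := t.take j with hpdef
  have hn1 : 1 ≤ t.length := by omega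
  have hplen : p.length = j := by
    rw [hpdef, List.length_take]
    have := Nat.div_le_self t.length 2
    omega
  have hlen : t.length = k * j := by rw [hk, repB_len, hplen]
  have hk2 : 2 ≤ k := by
    by_contra hlt
    interval_cases k <;> omega
  refine ⟨p, repB p (k-1), ?_, ?_, ?_⟩
  · intro h; rw [h] at hplen; simp at hplen; omega
  · intro h
    have := congrArg List.length h
    rw [repB_len, hplen] at this
    simp at this
    rcases this with h1 | h2 <;> omega
  · have hone : repB p 1 = p := by simp [repB]
    have h1 : p ++ t = repB p (1 + k) := by rw [repB_add, hk, hone]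
    calc p ++ t ++ repB p (k-1) = repB p (1+k) ++ repB p (k-1) := by rw [h1]
    _ = repB p (1+k+(k-1)) := by simp [repB_add, List.append_assoc]
    _ = repB p (k+k) := by congr 1; omega
    _ = t ++ t := by rw [repB_add, ← hk]

theorem B_iff (t : List Char) (ht : t ≠ []) :
    PySem.Chars.isIn t (PySem.Chars.slice (t ++ t) (some 1) (some (-1))) = true
    ↔ ∃ a b : List Char, a ≠ [] ∧ b ≠ [] ∧ a ++ t ++ b = t ++ t := by
  have hn1 : 1 ≤ t.length := List.length_pos_of_ne_nil ht
  have hslice : PySem.Chars.slice (t ++ t) (some 1) (some (-1))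
      = ((t ++ t).drop 1).take (2 * t.length - 2) := by
    rw [PySem.Chars.slice_eq_listSlice]
    have hlen : (t ++ t).length = 2 * t.length := by simp; omega
    have c1 : PySem.List.clampIdx (2*t.length) 1 = 1 := by
      simp [PySem.List.clampIdx]
      omega
    have c2 : PySem.List.clampIdx (2*t.length) (-1) = 2*t.length - 1 := by
      simp only [PySem.List.clampIdx, if_pos (by norm_num : (-1:ℤ) < 0)]
      rw [if_neg (by omega)]
      omega
    simp only [PySem.List.slice, hlen, c1, c2]
    congr 1
  rw [hslice, PySem.Chars.isIn_iff_infix]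
  set mid := ((t ++ t).drop 1).take (2 * t.length - 2) with hmid
  obtain ⟨c, t0, rfl⟩ : ∃ c t0, t = c :: t0 := by
    cases t with | nil => exact absurd rfl ht | cons c t0 => exact ⟨c, t0, rfl⟩
  constructor
  · rintro ⟨a', b', hab⟩
    have hd1 : ((c :: t0) ++ (c :: t0)).drop 1 = t0 ++ (c :: t0) := by simp
    have hlen2 : (t0 ++ (c :: t0)).length = 2 * (c :: t0).length - 1 := by simp; omega
    have hsplit : t0 ++ (c :: t0) = mid ++ (t0 ++ (c :: t0)).drop (2 * (c :: t0).length - 2) := by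
      rw [hmid, hd1, List.take_append_drop]
    set z := (t0 ++ (c :: t0)).drop (2 * (c :: t0).length - 2) with hz
    have hzlen : z.length = 1 := by rw [hz, List.length_drop]; omega
    refine ⟨c :: a', b' ++ z, by simp, ?_, ?_⟩
    · intro h; have := congrArg List.length h; simp [hzlen] at this
    · calc (c :: a') ++ (c :: t0) ++ (b' ++ z) = c :: (a' ++ (c :: t0) ++ b' ++ z) := by simp
      _ = c :: (mid ++ z) := by simp [← hab]
      _ = c :: (t0 ++ (c :: t0)) := by rw [← hsplit]
      _ = (c :: t0) ++ (c :: t0) := by simp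
  · rintro ⟨a, b, ha, hb, heq⟩
    obtain ⟨x, a2, rfl⟩ : ∃ x a2, a = x :: a2 := by
      cases a with | nil => exact absurd rfl ha | cons x a2 => exact ⟨x, a2, rfl⟩
    obtain ⟨b2, y, rfl⟩ : ∃ b2 y, b = b2 ++ [y] := by
      rcases List.eq_nil_or_concat b with h | ⟨b2, y, h⟩
      · exact absurd h hb
      · exact ⟨b2, y, by rw [h, List.concat_eq_append]⟩
    have hd : ((c :: t0) ++ (c :: t0)).drop 1 = a2 ++ (c :: t0) ++ (b2 ++ [y]) := by
      have := congrArg (List.drop 1) heq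
      simpa using this.symm
    have hlen3 : (a2 ++ (c :: t0) ++ b2).length = 2 * (c :: t0).length - 2 := by
      have := congrArg List.length heq
      simp at this ⊢
      omega
    refine ⟨a2, b2, ?_⟩
    rw [hmid, hd, ← hlen3]
    have : a2 ++ (c :: t0) ++ (b2 ++ [y]) = (a2 ++ (c :: t0) ++ b2) ++ [y] := by simp
    rw [this, List.take_left]

theorem getD_drop' (l : List Char) (m n : ℕ) (d : Char) : (l.drop m).getD n d = l.getD (m + n) d := by
  simp [List.getD, List.getElem?_drop]

theorem rep_of_mod : ∀ (n : ℕ) (t : List Char) (g : ℕ), t.length = n → 0 < g → g ∣ n →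
    (∀ j, j < n → t.getD j 'A' = t.getD (j % g) 'A') → t = repB (t.take g) (n / g) := by
  intro n
  induction n using Nat.strong_induction_on with
  | _ n ih =>
    intro t g hlen hg hdvd hmod
    rcases Nat.eq_zero_or_pos n with h0 | hpos
    · subst h0
      have ht : t = [] := List.eq_nil_of_length_eq_zero hlen
      simp [ht, repB]
    · have hgn : g ≤ n := Nat.le_of_dvd hpos hdvd
      obtain ⟨m, hm⟩ := hdvd
      by_cases hng : n = g
      · have h1 : t.take g = t := List.take_of_length_le (by omega)
        have h2 : n / g = 1 := by rw [hng, Nat.div_self hg]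
        rw [h1, h2]
        simp [repB]
      · have hm2 : 2 ≤ m := by
          rcases Nat.lt_or_ge m 2 with h | h
          · interval_cases m <;> omega
          · exact h
        have h2g : 2 * g ≤ n := by
          calc 2 * g ≤ m * g := Nat.mul_le_mul_right g hm2
          _ = n := by rw [hm, Nat.mul_comm]
        set t' := t.drop g with ht'
        have hlen' : t'.length = n - g := by simp [ht', hlen]
        have hdvd' : g ∣ (n - g) := Nat.dvd_sub ⟨m, hm⟩ dvd_rfl
        have hmod' : ∀ j, j < n - g → t'.getD j 'A' = t'.getD (j % g) 'A' := by
          intro j hj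
          have e1 : t'.getD j 'A' = t.getD (j % g) 'A' := by
            rw [ht', getD_drop', hmod (g + j) (by omega), Nat.add_mod_left]
          have e2 : t'.getD (j % g) 'A' = t.getD (j % g) 'A' := by
            have hjg : j % g < g := Nat.mod_lt _ hg
            rw [ht', getD_drop', hmod (g + j % g) (by omega), Nat.add_mod_left,
              Nat.mod_mod_of_dvd _ dvd_rfl]
          rw [e1, e2]
        have htake : t'.take g = t.take g := by
          apply List.ext_getElem
          · simp [hlen', hlen]; omega
          · intro i h1 h2
            have hi : i < g := by simp [hlen'] at h1; omega
            have e1 : (t'.take g)[i] = t'.getD i 'A' := by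
              rw [List.getD_eq_getElem _ _ (by simp [hlen']; omega)]
              simp [List.getElem_take]
            have e2 : (t.take g)[i] = t.getD i 'A' := by
              rw [List.getD_eq_getElem _ _ (by rw [hlen]; omega)]
              simp [List.getElem_take]
            rw [e1, e2, ht', getD_drop', hmod (g + i) (by omega), Nat.add_mod_left,
              Nat.mod_eq_of_lt hi]
        have ih' := ih (n - g) (by omega) t' g hlen' hg hdvd' hmod'
        rw [htake] at ih'
        have hdiv : n / g = 1 + (n - g) / g := by
          subst hm
          rw [Nat.mul_div_cancel_left _ hg]
          have : g * m - g = g * (m - 1) := by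
            rw [Nat.mul_sub, Nat.mul_one]
          rw [this, Nat.mul_div_cancel_left _ hg]
          omega
        calc t = t.take g ++ t' := (List.take_append_drop g t).symm
        _ = t.take g ++ repB (t.take g) ((n - g) / g) := by rw [← ih']
        _ = repB (t.take g) (1 + (n - g) / g) := by
            rw [repB_add]
            congr 1
            simp [repB]
        _ = repB (t.take g) (n / g) := by rw [← hdiv]

theorem P2_to_P1 (t : List Char) (ht : t ≠ [])
    (h : ∃ a b : List Char, a ≠ [] ∧ b ≠ [] ∧ a ++ t ++ b = t ++ t) :
    ∃ j : ℕ, 1 ≤ j ∧ j ≤ t.length / 2 ∧ j ∣ t.length ∧ ∃ k, t = repB (t.take j) k := by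
  obtain ⟨a, b, ha, hb, heq⟩ := h
  set n := t.length with hn
  have hpos : 0 < n := List.length_pos_of_ne_nil ht
  set r := a.length with hr
  have hr1 : 1 ≤ r := List.length_pos_of_ne_nil ha
  have hb1 : 1 ≤ b.length := List.length_pos_of_ne_nil hb
  have hlens : r + b.length = n := by
    have := congrArg List.length heq
    simp [← hn, ← hr] at this
    omega
  have hrn : r < n := by omega
  have heq' : a ++ (t ++ b) = t ++ t := by simpa [List.append_assoc] using heq
  have hidx : ∀ j, j < n → t.getD j 'A' = t.getD ((j + r) % n) 'A' := by
    intro j hj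
    have e1 : (a ++ (t ++ b)).getD (r + j) 'A' = t.getD j 'A' := by
      rw [List.getD_append_right a (t ++ b) 'A' (r + j) (by omega)]
      have : r + j - a.length = j := by omega
      rw [this, List.getD_append t b 'A' j hj]
    have e2 : (t ++ t).getD (r + j) 'A' = t.getD ((j + r) % n) 'A' := by
      by_cases hc : r + j < n
      · rw [List.getD_append t t 'A' (r + j) hc]
        congr 1
        rw [Nat.mod_eq_of_lt (by omega)]
        omega
      · rw [List.getD_append_right t t 'A' (r + j) (by omega)]
        congr 1
        have h1 : (j + r) % n = j + r - n := by
          rw [Nat.mod_eq_sub_mod (by omega), Nat.mod_eq_of_lt (by omega)]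
        omega
    rw [← e1, heq', e2]
  set u : ℕ → Char := fun j => t.getD (j % n) 'A' with hu
  have hu_r : ∀ j, u (j + r) = u j := by
    intro j
    show t.getD ((j + r) % n) 'A' = t.getD (j % n) 'A'
    rw [← Nat.mod_add_mod, ← hidx (j % n) (Nat.mod_lt _ hpos)]
  have hu_n : ∀ j, u (j + n) = u j := by
    intro j
    show t.getD ((j + n) % n) 'A' = t.getD (j % n) 'A'
    rw [Nat.add_mod_right]
  have hu_mr : ∀ m j, u (j + m * r) = u j := by
    intro m
    induction m with
    | zero => simp
    | succ m' ihm =>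
      intro j
      have : j + (m' + 1) * r = (j + m' * r) + r := by ring
      rw [this, hu_r, ihm]
  have hu_kn : ∀ m j, u (j + m * n) = u j := by
    intro m
    induction m with
    | zero => simp
    | succ m' ihm =>
      intro j
      have : j + (m' + 1) * n = (j + m' * n) + n := by ring
      rw [this, hu_n, ihm]
  set g := Nat.gcd r n with hg
  have hg1 : 0 < g := Nat.gcd_pos_of_pos_left n hr1
  have hgdvd : g ∣ n := Nat.gcd_dvd_right r n
  have hgr : g ≤ r := Nat.le_of_dvd hr1 (Nat.gcd_dvd_left r n)
  obtain ⟨m, hmn, hm⟩ := Nat.exists_mul_mod_eq_gcd (show Nat.gcd r n < n by omega)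
  have hu_g : ∀ j, u (j + g) = u j := by
    intro j
    have hdecomp : n * (r * m / n) + g = r * m := by
      conv_rhs => rw [← Nat.div_add_mod (r * m) n]
      rw [hm]
    have h2 : u (j + g + (r * m / n) * n) = u (j + g) := hu_kn _ _
    have harg : j + g + (r * m / n) * n = j + m * r := by
      rw [Nat.mul_comm (r * m / n) n, Nat.mul_comm m r]
      omega
    rw [← h2, harg, hu_mr]
  have hu_kg : ∀ m j, u (j + m * g) = u j := by
    intro m
    induction m with
    | zero => simp
    | succ m' ihm =>
      intro j
      have : j + (m' + 1) * g = (j + m' * g) + g := by ring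
      rw [this, hu_g, ihm]
  have hmodfact : ∀ j, j < n → t.getD j 'A' = t.getD (j % g) 'A' := by
    intro j hj
    have h1 : u j = u (j % g) := by
      conv_lhs => rw [show j = j % g + (j / g) * g from by rw [Nat.mod_add_div' j g]]
      exact hu_kg (j / g) (j % g)
    have hjg : j % g < n := lt_of_lt_of_le (Nat.mod_lt _ hg1) (by omega)
    simpa [hu, Nat.mod_eq_of_lt hj, Nat.mod_eq_of_lt hjg] using h1
  have hrep := rep_of_mod n t g hn.symm hg1 hgdvd hmodfact
  refine ⟨g, hg1, ?_, hgdvd, n / g, hrep⟩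
  rw [Nat.le_div_iff_mul_le (by norm_num)]
  obtain ⟨m', hm'⟩ := hgdvd
  have hm'2 : 2 ≤ m' := by
    rcases Nat.lt_or_ge m' 2 with hlt | hge
    · interval_cases m' <;> omega
    · exact hge
  calc g * 2 ≤ g * m' := Nat.mul_le_mul_left g hm'2
  _ = n := hm'.symm

theorem toChars_ne_nil (n : Int) : PySem.Int.toChars n ≠ [] := by
  unfold PySem.Int.toChars
  split
  · simp
  · intro h
    have := @Nat.length_toDigits_pos 10 n.toNat
    rw [h] at this
    simp at this

theorem A_iff (t : List Char) :
    ((PySem.List.pyRange 1 (PySem.Int.floordiv (PySem.Chars.len t) 2 + 1)).any fun i =>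
      if PySem.Int.mod (PySem.Chars.len t) i == 0 then
        PySem.Chars.replace t (PySem.Chars.slice t none (some i)) [] == []
      else false) = true
    ↔ ∃ j : ℕ, 1 ≤ j ∧ j ≤ t.length / 2 ∧ j ∣ t.length ∧
        PySem.Chars.replace t (t.take j) [] = [] := by
  have hlen : PySem.Chars.len t = (t.length : ℤ) := by simp [PySem.Chars.len_eq]
  have hfd : PySem.Int.floordiv (t.length : ℤ) 2 = ((t.length / 2 : ℕ) : ℤ) := by
    exact_mod_cast PySem.Int.floordiv_natCast t.length 2
  rw [List.any_eq_true]
  constructor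
  · rintro ⟨i, hi, hbody⟩
    rw [PySem.List.mem_pyRange_one, hlen, hfd] at hi
    obtain ⟨hi1, hi2⟩ := hi
    set j := i.toNat with hj
    have hij : i = (j : ℤ) := by omega
    refine ⟨j, by omega, by omega, ?_, ?_⟩
    · by_cases hc : PySem.Int.mod (PySem.Chars.len t) i == 0
      · have := (beq_iff_eq).mp hc
        rw [hlen, hij, PySem.Int.mod_eq_zero_iff_dvd] at this
        exact_mod_cast this
      · rw [if_neg hc] at hbody; exact absurd hbody (by simp)
    · by_cases hc : PySem.Int.mod (PySem.Chars.len t) i == 0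
      · rw [if_pos hc] at hbody
        have := (beq_iff_eq).mp hbody
        rw [PySem.Chars.slice_eq_listSlice, hij, PySem.List.slice_to_natCast t j] at this
        exact this
      · rw [if_neg hc] at hbody; exact absurd hbody (by simp)
  · rintro ⟨j, h1, h2, h3, h4⟩
    refine ⟨(j : ℤ), ?_, ?_⟩
    · rw [PySem.List.mem_pyRange_one, hlen, hfd]
      constructor
      · exact_mod_cast h1
      · have : (j : ℤ) ≤ ((t.length / 2 : ℕ) : ℤ) := by exact_mod_cast h2
        omega
    · rw [if_pos]
      · rw [beq_iff_eq, PySem.Chars.slice_eq_listSlice, PySem.List.slice_to_natCast t j]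
        exact h4
      · rw [beq_iff_eq, hlen, PySem.Int.mod_eq_zero_iff_dvd]
        exact_mod_cast h3

-- ===== VERDICT (by name: the statement is the Claim_ definition above) =====
theorem is_repeating_pattern_spec : Claim_equal_is_repeating_pattern := by
  intro currentId _
  unfold Spec_is_repeating_pattern is_repeating_pattern is_repeating_pattern_alt
  simp only []
  set t := PySem.Int.toChars currentId with hts
  have ht : t ≠ [] := toChars_ne_nil currentId
  rw [Bool.eq_iff_iff, A_iff, B_iff t ht]
  constructor
  · rintro ⟨j, h1, h2, h3, h4⟩
    have hp : t.take j ≠ [] := by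
      have : (t.take j).length = j := by
        rw [List.length_take]
        have := Nat.div_le_self t.length 2
        omega
      intro hnil; rw [hnil] at this; simp at this; omega
    obtain ⟨k, hk⟩ := (replace_empty_iff t (t.take j) hp).mp h4
    exact P1_to_P2 t j h1 h2 h3 k hk
  · intro h
    obtain ⟨j, h1, h2, h3, k, hk⟩ := P2_to_P1 t ht h
    refine ⟨j, h1, h2, h3, ?_⟩
    have hp : t.take j ≠ [] := by
      have hlen : (t.take j).length = j := by
        rw [List.length_take]
        have := Nat.div_le_self t.length 2
        omega
      intro hnil; rw [hnil] at hlen; simp at hlen; omega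
    exact (replace_empty_iff t (t.take j) hp).mpr ⟨k, hk⟩
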